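-- pv_equiv track=rewrite | github.com/DiegoAlb09/Euler2D | generator/topology_codes_extended.py | vcc_to_3ot
-- ===== SOURCE A (Python) =====
-- def vcc_to_3ot(vcc_code):
--     """
--     Convierte código VCC a 3OT basado en la dirección de los segmentos.
--     El código 3OT clasifica los segmentos en:
--     H: horizontal (movimiento horizontal dominante)
--     V: vertical (movimiento vertical dominante)
--     D: diagonal (movimiento diagonal)
--
--     Args:
--         vcc_code: Código VCC de la imagen
--
--     Returns:
--         list: Lista de direcciones (H, V, D)
--     """
--     ot3 = []
--     # Determinar dirección inicial basada en el primer segmento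
--     if vcc_code[0] == '0':  # Sin cambio
--         current_direction = 'H'
--     elif vcc_code[0] == '1':  # Giro izquierda
--         current_direction = 'V'
--     elif vcc_code[0] == '3':  # Giro derecha
--         current_direction = 'D'
--     else:  # Giro 180°
--         current_direction = 'H'
--
--     ot3.append(current_direction)
--
--     # Mapeo de transiciones de dirección
--     transitions = {
--         'H': {'0': 'H', '1': 'V', '3': 'D', '2': 'H'},  # Desde horizontal
--         'V': {'0': 'V', '1': 'D', '3': 'H', '2': 'V'},  # Desde vertical
--         'D': {'0': 'D', '1': 'H', '3': 'V', '2': 'D'}   # Desde diagonal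
--     }
--
--     # Procesar el resto del código
--     for i in range(1, len(vcc_code)):
--         vertex_type = vcc_code[i]
--         current_direction = transitions[current_direction][vertex_type]
--         ot3.append(current_direction)
--
--     return ot3
-- ===== SOURCE B (Python) =====
-- def vcc_to_3ot(vcc_code):
--     # Stateless closed form: the direction at position i is the net turn of the
--     # prefix mod 3 ('1' = +1 left, '3' = -1 right, '0'/'2' = 0), indexing 'HVD';
--     # a first character that is no turn code counts as no turn, as in A.
--     turn = {'0': 0, '1': 1, '2': 0, '3': -1}
--     return ['HVD'[(turn.get(vcc_code[0], 0) + sum(turn[c] for c in vcc_code[1:i + 1])) % 3]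
--             for i in range(len(vcc_code))]
-- ===== Notes on version B (the rewrite author's own statement) =====
-- stated objective: alternative
-- what changed: Replaces A's sequential 3-state transition-table automaton by a stateless closed form: each output position is computed independently from the prefix counts of left-turn and right-turn codes, mod 3.
import Mathlib
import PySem

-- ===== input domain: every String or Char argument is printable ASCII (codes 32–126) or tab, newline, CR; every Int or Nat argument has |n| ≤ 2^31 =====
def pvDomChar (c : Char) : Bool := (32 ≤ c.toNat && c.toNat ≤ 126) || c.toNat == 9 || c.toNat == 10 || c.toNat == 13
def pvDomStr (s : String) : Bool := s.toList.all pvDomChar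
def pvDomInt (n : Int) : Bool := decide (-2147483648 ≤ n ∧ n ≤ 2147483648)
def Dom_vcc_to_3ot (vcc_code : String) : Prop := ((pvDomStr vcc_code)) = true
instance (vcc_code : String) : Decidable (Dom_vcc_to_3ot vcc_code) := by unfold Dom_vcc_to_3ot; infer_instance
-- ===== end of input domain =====

-- B drops A's sequential transition-table automaton for a stateless closed form
-- (net turn count of the prefix, mod 3); objective: alternative.

-- ===== PORT A =====
-- transitions[d][c]; none = KeyError (excluded by Pre_)
def pvTransA (d : String) (c : Char) : Option String :=
  if d = "H" then
    (if c = '0' then some "H" else if c = '1' then some "V" else if c = '3' then some "D"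
     else if c = '2' then some "H" else none)
  else if d = "V" then
    (if c = '0' then some "V" else if c = '1' then some "D" else if c = '3' then some "H"
     else if c = '2' then some "V" else none)
  else
    (if c = '0' then some "D" else if c = '1' then some "H" else if c = '3' then some "V"
     else if c = '2' then some "D" else none)

-- one iteration of A's for-loop over state (ot3, current_direction)
def pvStepA (p : List String × String) (c : Char) : List String × String :=
  match pvTransA p.2 c with
  | some d' => (p.1 ++ [d'], d')
  | none => p   -- Python raises KeyError here; Pre_ excludes it

def vcc_to_3ot (vcc_code : String) : List String :=
  match vcc_code.toList with
  | [] => []   -- Python raises IndexError on vcc_code[0]; Pre_ excludes it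
  | c :: rest =>
    let d0 := if c = '0' then "H" else if c = '1' then "V" else if c = '3' then "D" else "H"
    (rest.foldl pvStepA ([d0], d0)).1

-- ===== PORT B =====
-- 'HVD'[t] for t ∈ {0,1,2} (exact: PySem.Int.mod _ 3 always lands in 0..2)
def pvLabel (t : Int) : String := if t = 0 then "H" else if t = 1 then "V" else "D"

-- turn[c]; none = KeyError (excluded by Pre_); turn.get(c, 0) is (pvTurn? c).getD 0
def pvTurn? (c : Char) : Option Int :=
  if c = '0' then some 0 else if c = '1' then some 1 else if c = '2' then some 0
  else if c = '3' then some (-1) else none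

-- sum(turn[c] for c in xs), left to right
def pvTurnSum (xs : List Char) : Int :=
  xs.foldl (fun a c => a + (pvTurn? c).getD 0) 0   -- none = KeyError, excluded by Pre_

-- vcc_code[1:i+1] (bounds 0 ≤ 1 ≤ i+1) is drop 1 then take i; vcc_code[0] is
-- head (never evaluated on the empty string, whose range is empty)
def vcc_to_3ot_alt (vcc_code : String) : List String :=
  (List.range vcc_code.toList.length).map (fun i =>
    pvLabel (PySem.Int.mod
      (((vcc_code.toList.head?.bind pvTurn?).getD 0)
        + pvTurnSum ((vcc_code.toList.drop 1).take i)) 3))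

-- ===== PRECONDITION & SPEC =====
-- Pre_ excludes exactly the inputs where A raises: the empty string (IndexError) and
-- strings with a character other than '0'..'3' after position 0 (KeyError).
def Pre_vcc_to_3ot (vcc_code : String) : Prop :=
  vcc_code.toList ≠ [] ∧
    (vcc_code.toList.drop 1).all (fun c => c == '0' || c == '1' || c == '2' || c == '3') = true
instance (vcc_code : String) : Decidable (Pre_vcc_to_3ot vcc_code) := by
  unfold Pre_vcc_to_3ot; infer_instance

def pvWitness_vcc_to_3ot : String := "00312"

def Spec_vcc_to_3ot (vcc_code : String) (out : List String) : Prop := out = vcc_to_3ot_alt vcc_code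
instance (vcc_code : String) (out : List String) : Decidable (Spec_vcc_to_3ot vcc_code out) := by unfold Spec_vcc_to_3ot; infer_instance

-- ===== CLAIM (what is proved, stated in full; the proofs are below) =====
def Claim_equal_vcc_to_3ot : Prop := ∀ (vcc_code : String), Dom_vcc_to_3ot vcc_code → Pre_vcc_to_3ot vcc_code → Spec_vcc_to_3ot vcc_code (vcc_to_3ot vcc_code)

-- ===== LEMMAS AND PROOFS =====

-- Nat label used to mirror A's direction strings
def pvLabN (t : Nat) : String := if t = 0 then "H" else if t = 1 then "V" else "D"

lemma pv_lab_cast (t : Nat) (ht : t < 3) : pvLabN t = pvLabel (t : Int) := by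
  interval_cases t <;> simp [pvLabN, pvLabel]

lemma pv_turnSum_snoc (xs : List Char) (c : Char) :
    pvTurnSum (xs ++ [c]) = pvTurnSum xs + (pvTurn? c).getD 0 := by
  simp [pvTurnSum, List.foldl_append]

-- A's step from a labelled state, for valid c
lemma pv_step (t : Nat) (ht : t < 3) (c : Char) (hc : c ∈ ['0', '1', '2', '3'])
    (acc : List String) :
    pvStepA (acc, pvLabN t) c
      = (acc ++ [pvLabN ((t + (if c = '1' then 1 else if c = '3' then 2 else 0)) % 3)],
         pvLabN ((t + (if c = '1' then 1 else if c = '3' then 2 else 0)) % 3)) := by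
  simp only [List.mem_cons, List.not_mem_nil, or_false] at hc
  interval_cases t <;>
    rcases hc with h | h | h | h <;> subst h <;>
      simp [pvStepA, pvTransA, pvLabN]

-- adding one character's turn, through the Nat accumulator
lemma pv_mod_shift (t : Nat) (c : Char) (s : Int)
    (hts : (t : Int) = PySem.Int.mod s 3) :
    ((((t + (if c = '1' then 1 else if c = '3' then 2 else 0)) % 3 : Nat)) : Int)
      = PySem.Int.mod (s + (pvTurn? c).getD 0) 3 := by
  rw [PySem.Int.mod_eq_emod_of_pos (by norm_num)] at hts
  rw [PySem.Int.mod_eq_emod_of_pos (by norm_num)]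
  unfold pvTurn?
  by_cases hc0 : c = '0' <;> by_cases hc1 : c = '1' <;> by_cases hc2 : c = '2' <;>
    by_cases hc3 : c = '3' <;> simp_all
  all_goals omega

-- main invariant: folding A's loop from a state whose label encodes
-- (g0 + pvTurnSum taken) mod 3 appends exactly B's closed-form labels
lemma pv_fold (rest : List Char) (hv : ∀ c ∈ rest, c ∈ ['0', '1', '2', '3'])
    (g0 : Int) (taken : List Char) (t : Nat) (ht : t < 3)
    (hts : (t : Int) = PySem.Int.mod (g0 + pvTurnSum taken) 3) (acc : List String) :
    (rest.foldl pvStepA (acc, pvLabN t)).1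
      = acc ++ (List.range rest.length).map
          (fun i => pvLabel (PySem.Int.mod (g0 + pvTurnSum (taken ++ rest.take (i + 1))) 3)) := by
  induction rest generalizing taken t acc with
  | nil => simp
  | cons c rest' ih =>
    have hc := hv c (List.mem_cons_self ..)
    set t' := (t + (if c = '1' then 1 else if c = '3' then 2 else 0)) % 3 with ht'
    have ht'3 : t' < 3 := Nat.mod_lt _ (by norm_num)
    have hts' : (t' : Int) = PySem.Int.mod (g0 + pvTurnSum (taken ++ [c])) 3 := by
      rw [pv_turnSum_snoc, ← add_assoc]
      exact pv_mod_shift t c _ hts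
    have hlab : pvLabN t' = pvLabel (PySem.Int.mod (g0 + pvTurnSum (taken ++ [c])) 3) := by
      rw [pv_lab_cast t' ht'3, hts']
    simp only [List.foldl_cons, pv_step t ht c hc acc]
    rw [ih (fun x hx => hv x (List.mem_cons_of_mem _ hx)) (taken ++ [c]) t' ht'3 hts']
    rw [List.length_cons, List.range_succ_eq_map, List.map_cons, List.map_map]
    simp only [List.take_succ_cons, List.take_zero, Function.comp_def]
    rw [hlab, List.append_assoc]
    simp only [List.singleton_append]
    congr 2
    apply List.map_congr_left
    intro i _
    simp [List.append_assoc]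

lemma pv_first (c : Char) :
    (if c = '0' then "H" else if c = '1' then "V" else if c = '3' then "D" else "H")
      = pvLabN (if c = '1' then 1 else if c = '3' then 2 else 0) := by
  by_cases h0 : c = '0' <;> by_cases h1 : c = '1' <;> by_cases h3 : c = '3' <;>
    simp_all [pvLabN]

lemma pv_t0 (c : Char) :
    (((if c = '1' then 1 else if c = '3' then 2 else 0 : Nat)) : Int)
      = PySem.Int.mod ((pvTurn? c).getD 0 + pvTurnSum []) 3 := by
  rw [PySem.Int.mod_eq_emod_of_pos (by norm_num)]
  unfold pvTurn? pvTurnSum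
  by_cases hc0 : c = '0' <;> by_cases hc1 : c = '1' <;> by_cases hc2 : c = '2' <;>
    by_cases hc3 : c = '3' <;> simp_all

-- ===== VERDICT (by name: the statement is the Claim_ definition above) =====
theorem vcc_to_3ot_spec : Claim_equal_vcc_to_3ot := by
  intro vcc_code _ hpre
  unfold Spec_vcc_to_3ot
  rcases hpre with ⟨hne, hval⟩
  rcases h : vcc_code.toList with _ | ⟨c, rest⟩
  · exact absurd h hne
  · have hrest : ∀ x ∈ rest, x ∈ ['0', '1', '2', '3'] := by
      intro x hx
      simp only [h, List.drop_succ_cons, List.drop_zero, List.all_eq_true] at hval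
      have := hval x hx
      simp only [Bool.or_eq_true, beq_iff_eq] at this
      simp only [List.mem_cons, List.not_mem_nil, or_false]
      tauto
    set t0 : Nat := (if c = '1' then 1 else if c = '3' then 2 else 0) with ht0
    have ht03 : t0 < 3 := by rw [ht0]; split_ifs <;> norm_num
    have hts0 : (t0 : Int)
        = PySem.Int.mod ((pvTurn? c).getD 0 + pvTurnSum []) 3 := by rw [ht0]; exact pv_t0 c
    have hA : vcc_to_3ot vcc_code = (rest.foldl pvStepA ([pvLabN t0], pvLabN t0)).1 := by
      unfold vcc_to_3ot
      rw [h]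
      simp only [pv_first c, ← ht0]
    rw [hA, pv_fold rest hrest ((pvTurn? c).getD 0) [] t0 ht03 hts0 [pvLabN t0]]
    unfold vcc_to_3ot_alt
    rw [h]
    rw [List.length_cons, List.range_succ_eq_map, List.map_cons, List.map_map]
    simp only [List.head?_cons, Option.bind_some, List.drop_succ_cons, List.drop_zero,
      List.take_zero, Function.comp_def, List.nil_append]
    congr 1
    rw [pv_lab_cast t0 ht03, hts0]
    simp [pvTurnSum]
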